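-- pv_equiv track=rewrite | github.com/yayaya123/Python | action extration et txt.py | getdatelist
-- ===== SOURCE A (Python) =====
-- def getdatelist(array, lag):
--     datelist=[]
--     cpt=0
--     for i in range(len(array)):
--         if array[i]<0:
--             cpt+=1
--             if cpt >= lag:
--                 datelist.append(i)
--                 #cpt=0
--         else:
--             cpt=0
--
--     return datelist
-- ===== SOURCE B (Python) =====
-- def getdatelist(array, lag):
--     # Pass 1: collect maximal runs of consecutive negatives as (start, length).
--     runs = []
--     cur = None
--     for i, x in enumerate(array):
--         if x < 0:
--             cur = (i, 1) if cur is None else (cur[0], cur[1] + 1)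
--         else:
--             if cur is not None:
--                 runs.append(cur)
--                 cur = None
--     if cur is not None:
--         runs.append(cur)
--     # Pass 2: each run (s, L) contributes the indices s+k0 .. s+L-1.
--     out = []
--     k0 = max(lag - 1, 0)
--     for s, L in runs:
--         out.extend(range(s + k0, s + L))
--     return out
-- ===== Notes on version B (the rewrite author's own statement) =====
-- stated objective: alternative
-- what changed: Replaces the per-element streak counter with a two-phase decomposition: first group consecutive negatives into maximal runs (start, length), then emit the tail indices s+max(lag-1,0) .. s+L-1 of each run.
import Mathlib
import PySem

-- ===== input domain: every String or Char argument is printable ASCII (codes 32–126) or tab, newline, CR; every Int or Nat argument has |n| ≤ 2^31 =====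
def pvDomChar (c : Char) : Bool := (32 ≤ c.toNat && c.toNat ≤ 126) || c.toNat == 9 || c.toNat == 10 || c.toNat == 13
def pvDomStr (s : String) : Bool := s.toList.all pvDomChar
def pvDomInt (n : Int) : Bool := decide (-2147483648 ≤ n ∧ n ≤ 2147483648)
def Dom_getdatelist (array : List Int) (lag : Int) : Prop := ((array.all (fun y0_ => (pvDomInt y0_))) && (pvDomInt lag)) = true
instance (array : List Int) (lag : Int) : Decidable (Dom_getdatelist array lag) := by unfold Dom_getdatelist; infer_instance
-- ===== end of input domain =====

-- B replaces A's per-element streak counter with a find-runs-then-emit-tails decomposition (alternative, same O(n) cost).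


-- ===== PORT A =====
def getdatelist (array : List Int) (lag : Int) : List Int :=
  -- datelist=[]; cpt=0; for i in range(len(array)): …
  let st := (PySem.List.pyRange 0 (array.length : Int) 1).foldl
    (fun (st : List Int × Int) i =>
      if PySem.List.pyGetD array i 0 < 0 then
        let cpt := st.2 + 1
        (if lag ≤ cpt then st.1 ++ [i] else st.1, cpt)
      else (st.1, 0))
    ([], 0)
  st.1

-- ===== PORT B =====
def getdatelist_alt (array : List Int) (lag : Int) : List Int :=
  -- Pass 1: maximal runs of consecutive negatives as (start, length)
  let st := (PySem.List.enumerate array 0).foldl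
    (fun (st : List (Int × Int) × Option (Int × Int)) (p : Int × Int) =>
      if p.2 < 0 then
        match st.2 with
        | none => (st.1, some (p.1, 1))
        | some c => (st.1, some (c.1, c.2 + 1))
      else
        match st.2 with
        | none => (st.1, none)
        | some c => (st.1 ++ [c], none))
    ([], none)
  let runs := match st.2 with
    | none => st.1
    | some c => st.1 ++ [c]
  -- Pass 2: emit tails
  let k0 := max (lag - 1) 0
  runs.foldl (fun out r => out ++ PySem.List.pyRange (r.1 + k0) (r.1 + r.2) 1) []

-- ===== PRECONDITION & SPEC =====
def Spec_getdatelist (array : List Int) (lag : Int) (out : List Int) : Prop := out = getdatelist_alt array lag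
instance (array : List Int) (lag : Int) (out : List Int) : Decidable (Spec_getdatelist array lag out) := by unfold Spec_getdatelist; infer_instance

-- ===== CLAIM (what is proved, stated in full; the proofs are below) =====
def Claim_equal_getdatelist : Prop := ∀ (array : List Int) (lag : Int), Dom_getdatelist array lag → Spec_getdatelist array lag (getdatelist array lag)

-- ===== LEMMAS AND PROOFS =====

-- A's fold step, seen over (index, value) pairs
def stepA (lag : Int) (st : List Int × Int) (p : Int × Int) : List Int × Int :=
  if p.2 < 0 then
    let cpt := st.2 + 1
    (if lag ≤ cpt then st.1 ++ [p.1] else st.1, cpt)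
  else (st.1, 0)

-- B's fold step
def stepB (st : List (Int × Int) × Option (Int × Int)) (p : Int × Int) :
    List (Int × Int) × Option (Int × Int) :=
  if p.2 < 0 then
    match st.2 with
    | none => (st.1, some (p.1, 1))
    | some c => (st.1, some (c.1, c.2 + 1))
  else
    match st.2 with
    | none => (st.1, none)
    | some c => (st.1 ++ [c], none)

def emitRun (lag : Int) (r : Int × Int) : List Int :=
  PySem.List.pyRange (r.1 + max (lag - 1) 0) (r.1 + r.2) 1

def finalize (st : List (Int × Int) × Option (Int × Int)) : List (Int × Int) :=
  match st.2 with
  | none => st.1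
  | some c => st.1 ++ [c]

-- Main invariant induction: processing the same suffix from related states gives A's
-- accumulator equal to B's runs flat-mapped through emitRun.
theorem main_invariant (lag : Int) (xs : List Int) :
    ∀ (s : Int) (accA : List Int) (cpt : Int) (runsB : List (Int × Int))
      (cur : Option (Int × Int)),
      0 ≤ cpt →
      cur = (if cpt = 0 then none else some (s - cpt, cpt)) →
      accA = runsB.flatMap (emitRun lag) ++
        PySem.List.pyRange (s - cpt + max (lag - 1) 0) s 1 →
      ((PySem.List.enumerate xs s).foldl (stepA lag) (accA, cpt)).1 =
        (finalize ((PySem.List.enumerate xs s).foldl stepB (runsB, cur))).flatMap (emitRun lag) := by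
  induction xs with
  | nil =>
    intro s accA cpt runsB cur hcpt hcur hacc
    simp only [PySem.List.enumerate_nil, List.foldl_nil]
    by_cases h : cpt = 0
    · subst h
      rw [if_pos rfl] at hcur
      subst hcur
      simp only [finalize]
      rw [hacc, PySem.List.pyRange_one_eq_nil (by omega : s ≤ s - 0 + max (lag - 1) 0)]
      simp
    · rw [if_neg h] at hcur
      subst hcur
      simp only [finalize]
      rw [hacc]
      simp [emitRun]
  | cons x rest ih =>
    intro s accA cpt runsB cur hcpt hcur hacc
    rw [PySem.List.enumerate_cons]
    simp only [List.foldl_cons]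
    by_cases hx : x < 0
    · -- negative: A bumps cpt, B extends/opens the run
      have hstA : stepA lag (accA, cpt) (s, x) =
          (if lag ≤ cpt + 1 then accA ++ [s] else accA, cpt + 1) := by
        simp [stepA, hx]
      rw [hstA]
      have hstB : stepB (runsB, cur) (s, x) = (runsB, some ((s + 1) - (cpt + 1), cpt + 1)) := by
        by_cases h : cpt = 0
        · subst h; rw [if_pos rfl] at hcur; subst hcur
          simp [stepB, hx]
        · rw [if_neg h] at hcur; subst hcur
          have h2 : s - cpt = s + 1 - (cpt + 1) := by omega
          simp only [stepB, if_pos hx, h2]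
      rw [hstB]
      apply ih (s + 1) _ (cpt + 1) runsB _ (by omega)
      · rw [if_neg (by omega)]
      · by_cases hl : lag ≤ cpt + 1
        · rw [if_pos hl, hacc]
          have hsplit : PySem.List.pyRange (s + 1 - (cpt + 1) + max (lag - 1) 0) (s + 1) 1 =
              PySem.List.pyRange (s - cpt + max (lag - 1) 0) s 1 ++ [s] := by
            have h1 : s + 1 - (cpt + 1) + max (lag - 1) 0 = s - cpt + max (lag - 1) 0 := by omega
            rw [h1, PySem.List.pyRange_one_succ_right (by omega)]
          rw [hsplit, List.append_assoc]
        · rw [if_neg hl, hacc]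
          have h1 : PySem.List.pyRange (s - cpt + max (lag - 1) 0) s 1 = [] :=
            PySem.List.pyRange_one_eq_nil (by omega)
          have h2 : PySem.List.pyRange (s + 1 - (cpt + 1) + max (lag - 1) 0) (s + 1) 1 = [] :=
            PySem.List.pyRange_one_eq_nil (by omega)
          rw [h1, h2]
    · -- non-negative: A resets cpt, B closes any open run
      have hstA : stepA lag (accA, cpt) (s, x) = (accA, 0) := by
        simp [stepA, hx]
      rw [hstA]
      have hstB : stepB (runsB, cur) (s, x) = (finalize (runsB, cur), none) := by
        cases cur with
        | none => simp [stepB, hx, finalize]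
        | some c => simp [stepB, hx, finalize]
      rw [hstB]
      apply ih (s + 1) _ 0 _ _ le_rfl rfl
      rw [hacc]
      by_cases h : cpt = 0
      · subst h; rw [if_pos rfl] at hcur; subst hcur
        simp only [finalize]
        rw [PySem.List.pyRange_one_eq_nil (by omega),
            PySem.List.pyRange_one_eq_nil (by omega : s + 1 ≤ s + 1 - 0 + max (lag - 1) 0)]
      · rw [if_neg h] at hcur; subst hcur
        simp only [finalize]
        rw [List.flatMap_append, PySem.List.pyRange_one_eq_nil
            (by omega : s + 1 ≤ s + 1 - 0 + max (lag - 1) 0)]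
        simp [emitRun]

-- A's range-over-indices fold equals the fold over enumerate with stepA
theorem getdatelist_eq_enum_fold (array : List Int) (lag : Int) :
    getdatelist array lag = ((PySem.List.enumerate array 0).foldl (stepA lag) ([], 0)).1 := by
  unfold getdatelist
  rw [PySem.List.enumerate_eq_map_pyRange array 0, List.foldl_map]
  rfl

-- ===== VERDICT (by name: the statement is the Claim_ definition above) =====
theorem getdatelist_spec : Claim_equal_getdatelist := by
  intro array lag _
  unfold Spec_getdatelist
  rw [getdatelist_eq_enum_fold]
  have h := main_invariant lag array 0 [] 0 [] none le_rfl (by simp)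
    (by rw [PySem.List.pyRange_one_eq_nil (by omega)]; simp)
  rw [h]
  unfold getdatelist_alt
  rw [PySem.List.foldl_append_eq_flatMap]
  rfl
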